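-- pv_equiv track=rewrite | github.com/raphael-group/hatchet | src/hatchet/utils/plot_cn_1d2d.py | reindex
-- ===== SOURCE A (Python) =====
-- from collections import Counter
--
-- def reindex(labels):
--     """
--     Given a list of labels, reindex them as integers from 1 to n_labels
--     Labels are in nonincreasing order of prevalence
--     """
--     old2new = {}
--     j = 1
--     for i, _ in Counter(labels).most_common():
--         old2new[i] = j
--         j += 1
--     old2newf = lambda x: old2new[x]
--
--     return [old2newf(a) for a in labels], old2new
-- ===== SOURCE B (Python) =====
-- def reindex(labels):
--     """
--     Given a list of labels, reindex them as integers from 1 to n_labels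
--     Labels are in nonincreasing order of prevalence.
--     (counting sort: distinct labels are dropped into buckets indexed by their
--     frequency and the buckets are read from the highest count down; ties keep
--     first-appearance order because the counting dict keeps insertion order)
--     """
--     # plain-dict frequency count (insertion order = first appearance)
--     cnt = {}
--     for a in labels:
--         cnt[a] = cnt.get(a, 0) + 1
--     # bucket the distinct labels by their count (counts are in 1..len(labels))
--     buckets = [[] for _ in range(len(labels) + 1)]
--     for lab in cnt:
--         buckets[cnt[lab]].append(lab)
--     # read the buckets from the highest count down
--     order = []
--     for c in range(len(labels), 0, -1):
--         order.extend(buckets[c])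
--     old2new = dict(zip(order, range(1, len(order) + 1)))
--     return [old2new[a] for a in labels], old2new
-- ===== Notes on version B (the rewrite author's own statement) =====
-- stated objective: alternative
-- what changed: Replaces Counter.most_common's stable comparison sort and the running-counter dict build by a counting sort (a list of buckets indexed by frequency, read from the highest count down) and a rank dict built at once with dict(zip(order, range(1, k+1))).
import Mathlib
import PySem

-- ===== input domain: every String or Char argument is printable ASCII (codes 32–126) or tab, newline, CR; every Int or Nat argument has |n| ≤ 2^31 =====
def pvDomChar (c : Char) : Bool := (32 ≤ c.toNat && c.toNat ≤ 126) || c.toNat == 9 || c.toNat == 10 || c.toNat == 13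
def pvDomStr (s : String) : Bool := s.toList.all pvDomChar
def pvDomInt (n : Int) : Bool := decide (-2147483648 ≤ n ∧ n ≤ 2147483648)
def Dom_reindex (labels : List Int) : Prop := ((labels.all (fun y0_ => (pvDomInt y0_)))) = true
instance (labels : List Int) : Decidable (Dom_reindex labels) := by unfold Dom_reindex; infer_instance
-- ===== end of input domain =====

-- B replaces Counter.most_common's stable comparison sort by a counting sort (a plain-dict
-- frequency count, a list of buckets indexed by count read from the highest count down)
-- and builds the rank dict at once from zip(order, range(1, k+1)); same return value.

-- ===== PORT A =====
-- Counter(labels).most_common() = sorted(counter.items(), key=itemgetter(1), reverse=True)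
-- (stable; ties keep Counter insertion order) — ported as PySem.List.sorted … true.
-- old2new[x] can never raise KeyError (every label is a Counter key), so the lookup is
-- ported as getD _ 0 exactly.
def reindex (labels : List Int) : List Int × (List (Int × Int)) :=
  let mc := PySem.List.sorted (PySem.Dict.counter labels).items (fun p => p.2) true
  let st := mc.foldl
    (fun (st : PySem.Dict Int Int × Int) p => (st.1.insert p.1 st.2, st.2 + 1))
    (PySem.Dict.empty, 1)
  let old2new := st.1
  (labels.map (fun a => old2new.getD a 0), old2new.items)

-- ===== PORT B =====
-- cnt.get(a, 0) is getD; 'for lab in cnt' walks the dict keys in insertion order;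
-- cnt[lab] never raises (lab is a key), so it is getD _ 0 exactly; the bucket index
-- cnt[lab] is a count in 1..len(labels), hence nonnegative and in range, so the
-- read buckets[cnt[lab]] is pyGetD and the write is List.set at .toNat (both exact here);
-- old2new[a] never raises (every label is in order), so it is getD _ 0 exactly.
def reindex_alt (labels : List Int) : List Int × (List (Int × Int)) :=
  let cnt := labels.foldl
    (fun (d : PySem.Dict Int Int) a => d.insert a (d.getD a 0 + 1)) PySem.Dict.empty
  let buckets := cnt.keys.foldl
    (fun (bs : List (List Int)) lab =>
      bs.set (cnt.getD lab 0).toNat (PySem.List.pyGetD bs (cnt.getD lab 0) [] ++ [lab]))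
    (List.replicate (labels.length + 1) [])
  let order := (PySem.List.pyRange (labels.length : Int) 0 (-1)).foldl
    (fun (o : List Int) c => o ++ PySem.List.pyGetD buckets c []) []
  let old2new := PySem.Dict.ofList (order.zip (PySem.List.pyRange 1 ((order.length : Int) + 1)))
  (labels.map (fun a => old2new.getD a 0), old2new.items)

-- ===== PRECONDITION & SPEC =====
def Spec_reindex (labels : List Int) (out : List Int × (List (Int × Int))) : Prop := out = reindex_alt labels
instance (labels : List Int) (out : List Int × (List (Int × Int))) : Decidable (Spec_reindex labels out) := by unfold Spec_reindex; infer_instance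

-- ===== CLAIM (what is proved, stated in full; the proofs are below) =====
def Claim_equal_reindex : Prop := ∀ (labels : List Int), Dom_reindex labels → Spec_reindex labels (reindex labels)

-- ===== LEMMAS AND PROOFS =====

-- insertBy places x after a block it never goes before, and before a tail whose head it goes before
theorem pv_insertBy_split {α : Type} (before : α → α → Bool) (x : α) (ys zs : List α)
    (h1 : ∀ y ∈ ys, before x y = false)
    (h2 : ∀ z, zs.head? = some z → before x z = true) :
    PySem.List.insertBy before x (ys ++ zs) = ys ++ x :: zs := by
  induction ys with
  | nil =>
    cases zs with
    | nil => simp [PySem.List.insertBy]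
    | cons z t => simp [PySem.List.insertBy, h2 z rfl]
  | cons y ys ih =>
    have hy : before x y = false := h1 y (by simp)
    simp only [List.cons_append, PySem.List.insertBy, hy]
    simp only [Bool.false_eq_true, if_false, List.cons.injEq, true_and]
    exact ih (fun y hy => h1 y (by simp [hy]))

-- stable descending sort = concatenation of the key-buckets, walked along a strictly
-- decreasing list of keys covering all keys of l
theorem pv_sorted_rev_bucket {α : Type} (l : List α) (key : α → Int) (cs : List Int)
    (hcs : cs.Pairwise (fun a b => b < a)) (hmem : ∀ x ∈ l, key x ∈ cs) :
    PySem.List.sorted l key true = cs.flatMap (fun c => l.filter (fun x => key x == c)) := by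
  induction l using List.reverseRecOn with
  | nil => simp [PySem.List.sorted]
  | append_singleton l x ih =>
    have hx : key x ∈ cs := hmem x (by simp)
    obtain ⟨cs₁, cs₂, hsplit⟩ := List.append_of_mem hx
    have hmem' : ∀ y ∈ l, key y ∈ cs := fun y hy => hmem y (by simp [hy])
    have hih := ih hmem'
    have hpw := hsplit ▸ hcs
    rw [List.pairwise_append] at hpw
    have hgt : ∀ c ∈ cs₁, key x < c := fun c hc => hpw.2.2 c hc (key x) (by simp)
    have hlt : ∀ c ∈ cs₂, c < key x := by
      have := hpw.2.1
      rw [List.pairwise_cons] at this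
      exact fun c hc => this.1 c hc
    have hs : PySem.List.sorted (l ++ [x]) key true
        = PySem.List.insertBy (fun a b => decide (key b < key a)) x (PySem.List.sorted l key true) := by
      rw [PySem.List.sorted_rev_eq_foldl_insertBy, PySem.List.sorted_rev_eq_foldl_insertBy,
        List.foldl_append, List.foldl_cons, List.foldl_nil]
    rw [hs, hih, hsplit]
    simp only [List.flatMap_append, List.flatMap_cons]
    rw [← List.append_assoc]
    rw [pv_insertBy_split (fun a b => decide (key b < key a)) x
      (cs₁.flatMap (fun c => l.filter (fun y => key y == c)) ++ l.filter (fun y => key y == key x))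
      (cs₂.flatMap (fun c => l.filter (fun y => key y == c)))
      (by
        intro y hy
        simp only [List.mem_append, List.mem_flatMap, List.mem_filter] at hy
        have : ¬ key y < key x := by
          rcases hy with ⟨c, hc, _, hk⟩ | ⟨_, hk⟩
          · have := hgt c hc; have := beq_iff_eq.mp hk; omega
          · have := beq_iff_eq.mp hk; omega
        simpa using this)
      (by
        intro z hz
        have hzmem : z ∈ cs₂.flatMap (fun c => l.filter (fun y => key y == c)) :=
          List.mem_of_mem_head? hz
        simp only [List.mem_flatMap, List.mem_filter] at hzmem
        obtain ⟨c, hc, _, hk⟩ := hzmem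
        have := hlt c hc; have := beq_iff_eq.mp hk
        simp; omega)]
    have hfl : ∀ (ds : List Int), (∀ c ∈ ds, c ≠ key x) →
        ds.flatMap (fun c => (l ++ [x]).filter (fun y => key y == c))
          = ds.flatMap (fun c => l.filter (fun y => key y == c)) := by
      intro ds hds
      apply List.flatMap_congr
      intro c hc
      rw [List.filter_append]
      have : (key x == c) = false := by
        have := hds c hc; simp; omega
      simp [this]
    rw [hfl cs₁ (fun c hc => by have := hgt c hc; omega),
        hfl cs₂ (fun c hc => by have := hlt c hc; omega)]
    rw [List.filter_append]
    simp [List.append_assoc]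

-- range(n, 0, -1) is [n, n-1, …, 1] (as casts of the Nats n-k)
theorem pv_pyRange_down (m : Nat) :
    PySem.List.pyRange (m : Int) 0 (-1) = (List.range m).map (fun k : Nat => ((m - k : Nat) : Int)) := by
  unfold PySem.List.pyRange
  norm_num
  have hif : (if 0 < m then m else 0) = m := by split <;> omega
  rw [hif]
  apply List.map_congr_left
  intro k hk
  simp only [List.mem_range] at hk
  omega

-- ranks (k₀, j), (k₁, j+1), … used to name both dicts' item lists
def pvRanks : List Int → Int → List (Int × Int)
  | [], _ => []
  | k :: t, j => (k, j) :: pvRanks t (j + 1)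

theorem pvRanks_map_fst (ks : List Int) (j : Int) : (pvRanks ks j).map (fun p => p.1) = ks := by
  induction ks generalizing j with
  | nil => rfl
  | cons k t ih => simp [pvRanks, ih]

-- zip(order, range(1, k+1)) is exactly the rank list
theorem pv_zip_range (ks : List Int) (j : Int) :
    ks.zip (PySem.List.pyRange j (j + (ks.length : Int))) = pvRanks ks j := by
  induction ks generalizing j with
  | nil => simp [pvRanks, List.zip]
  | cons k t ih =>
    have hlt : j < j + ((k :: t).length : Int) := by simp only [List.length_cons]; push_cast; omega
    rw [PySem.List.pyRange_one_cons hlt]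
    have hb : j + (((k :: t).length : Int)) = (j + 1) + (t.length : Int) := by
      simp only [List.length_cons]; push_cast; omega
    rw [hb]
    simpa [pvRanks] using ih (j + 1)

-- A's rank-assignment loop appends fresh keys with ranks j, j+1, …
theorem pv_rank_fold (ps : List (Int × Int)) (d : PySem.Dict Int Int) (j : Int)
    (hfresh : ∀ p ∈ ps, d.contains p.1 = false) (hnd : (ps.map (fun p => p.1)).Nodup) :
    (ps.foldl (fun st p => (st.1.insert p.1 st.2, st.2 + 1)) (d, j)).1.items
      = d.items ++ pvRanks (ps.map (fun p => p.1)) j := by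
  induction ps generalizing d j with
  | nil => simp [pvRanks]
  | cons p t ih =>
    simp only [List.foldl_cons, List.map_cons, pvRanks]
    have hp : d.contains p.1 = false := hfresh p (by simp)
    have hnd' := hnd
    simp only [List.map_cons, List.nodup_cons] at hnd'
    rw [ih (d.insert p.1 j) (j + 1)
      (by
        intro q hq
        rw [PySem.Dict.contains_insert]
        have hq1 : q.1 ∈ t.map (fun p => p.1) := List.mem_map_of_mem hq
        have h1 : (q.1 == p.1) = false := by
          simp only [beq_eq_false_iff_ne, ne_eq]
          intro he; exact hnd'.1 (he ▸ hq1)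
        rw [h1, hfresh q (by simp [hq]), Bool.or_self]
      ) hnd'.2]
    rw [PySem.Dict.items_insert_of_not_contains _ _ hp]
    simp

-- the bucket loop: bucket c collects, in order, the processed elements with f x = c
theorem pv_bucket_fold (f : Int → Nat) (ls : List Int) (bs : List (List Int))
    (hlen : ∀ x ∈ ls, f x < bs.length) (c : Nat) (hc : c < bs.length) :
    (ls.foldl (fun bs x => bs.set (f x) (bs.getD (f x) [] ++ [x])) bs).getD c []
      = bs.getD c [] ++ ls.filter (fun x => f x == c) := by
  induction ls generalizing bs with
  | nil => simp
  | cons x t ih =>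
    simp only [List.foldl_cons, List.filter_cons]
    have hx : f x < bs.length := hlen x (by simp)
    have hset : ∀ c' : Nat, c' < bs.length →
        (bs.set (f x) (bs.getD (f x) [] ++ [x])).getD c' []
          = if f x = c' then bs.getD c' [] ++ [x] else bs.getD c' [] := by
      intro c' hc'
      by_cases h : f x = c'
      · subst h
        simp [List.getD, hx]
      · simp [List.getD, List.getElem?_set_ne h, h]
    rw [ih (bs.set (f x) (bs.getD (f x) [] ++ [x]))
      (by intro y hy; rw [List.length_set]; exact hlen y (by simp [hy]))
      (by rw [List.length_set]; exact hc)]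
    rw [hset c hc]
    by_cases h : f x = c
    · simp [h, List.append_assoc]
    · have : (f x == c) = false := by simp [h]
      simp [h, this]

-- ===== VERDICT (by name: the statement is the Claim_ definition above) =====
theorem reindex_spec : Claim_equal_reindex := by
  intro labels _
  unfold Spec_reindex
  simp only [reindex, reindex_alt]
  rw [PySem.Dict.foldl_insert_getD_add_one_eq_counter, PySem.Dict.keys_counter]
  set ks := PySem.Set.ofList labels with hks
  set csN := (List.range labels.length).map (fun k : Nat => ((labels.length - k : Nat) : Int)) with hcsN
  have hndks : ks.Nodup := PySem.Set.nodup_ofList labels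
  have hcount : ∀ x ∈ ks, 1 ≤ labels.count x ∧ labels.count x ≤ labels.length := by
    intro x hx
    have hxl : x ∈ labels := (PySem.Set.mem_ofList _ _).mp hx
    exact ⟨List.count_pos_iff.mpr hxl, List.count_le_length⟩
  -- the counting loop over the dict keys IS the bucket fold over the counts
  have hbk : ks.foldl
      (fun (bs : List (List Int)) lab =>
        bs.set ((PySem.Dict.counter labels).getD lab 0).toNat
          (PySem.List.pyGetD bs ((PySem.Dict.counter labels).getD lab 0) [] ++ [lab]))
      (List.replicate (labels.length + 1) [])
    = ks.foldl
      (fun (bs : List (List Int)) lab =>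
        bs.set (labels.count lab) (bs.getD (labels.count lab) [] ++ [lab]))
      (List.replicate (labels.length + 1) []) := by
    apply PySem.List.foldl_congr_mem
    intro bs lab _
    rw [PySem.Dict.getD_counter, PySem.List.pyGetD_natCast, Int.toNat_natCast]
  rw [hbk, PySem.List.foldl_append_eq_flatMap, List.nil_append, pv_pyRange_down, ← hcsN]
  -- each bucket read is the filter of the distinct labels with that count
  have horder : csN.flatMap
      (fun c => PySem.List.pyGetD
        (ks.foldl (fun (bs : List (List Int)) lab =>
          bs.set (labels.count lab) (bs.getD (labels.count lab) [] ++ [lab]))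
          (List.replicate (labels.length + 1) [])) c [])
    = csN.flatMap (fun c => ks.filter (fun x => ((labels.count x : Int)) == c)) := by
    apply List.flatMap_congr
    intro c hc
    rw [hcsN] at hc
    simp only [List.mem_map, List.mem_range] at hc
    obtain ⟨k, hk, rfl⟩ := hc
    rw [PySem.List.pyGetD_natCast]
    rw [pv_bucket_fold (fun x => labels.count x) ks (List.replicate (labels.length + 1) [])
      (by intro x hx; simp only [List.length_replicate]; have := (hcount x hx).2; omega)
      (labels.length - k) (by rw [List.length_replicate]; omega)]
    have hrep : (List.replicate (labels.length + 1) ([] : List Int)).getD (labels.length - k) [] = [] := by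
      simp [List.getD]
    rw [hrep, List.nil_append]
    apply List.filter_congr
    intro x _
    rw [Bool.eq_iff_iff]
    simp
  rw [horder]
  -- A's most_common as the same buckets: csN is strictly decreasing and covers all counts
  have hcspw : csN.Pairwise (fun a b => b < a) := by
    rw [hcsN, List.pairwise_map]
    apply List.Pairwise.imp_of_mem ?_ List.pairwise_lt_range
    intro a b ha hb hab
    simp only [List.mem_range] at ha hb
    omega
  have hpairsmem : ∀ p ∈ (PySem.Dict.counter labels).items, p.2 ∈ csN := by
    intro p hp
    rw [PySem.Dict.items_counter] at hp
    simp only [List.mem_map] at hp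
    obtain ⟨x, hx, rfl⟩ := hp
    obtain ⟨h1, h2⟩ := hcount x hx
    rw [hcsN]
    simp only [List.mem_map, List.mem_range]
    exact ⟨labels.length - labels.count x, by omega, by congr 1; omega⟩
  rw [pv_sorted_rev_bucket _ _ csN hcspw hpairsmem]
  set items := (PySem.Dict.counter labels).items with hitems
  set mcFlat := csN.flatMap (fun c => items.filter (fun p => p.2 == c)) with hmcFlat
  set osE := csN.flatMap (fun c => ks.filter (fun x => ((labels.count x : Int)) == c)) with hosE
  -- the keys of A's sorted pairs are exactly B's order list
  have hos : mcFlat.map (fun p => p.1) = osE := by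
    rw [hmcFlat, hosE, List.map_flatMap]
    apply List.flatMap_congr
    intro c _
    rw [hitems, PySem.Dict.items_counter, List.filter_map, List.map_map]
    simp [Function.comp_def, ← hks]
  -- both orders are duplicate-free
  have hpermitems : mcFlat.Perm items := by
    rw [hmcFlat, ← pv_sorted_rev_bucket items (fun p => p.2) csN hcspw hpairsmem]
    exact PySem.List.sorted_perm items (fun p => p.2) true
  have hitemsfst : items.map (fun p => p.1) = ks := by
    rw [hitems, PySem.Dict.items_counter, List.map_map]
    simp [Function.comp_def, ← hks]
  have hndos : osE.Nodup := by
    rw [← hos]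
    exact ((hpermitems.map (fun p => p.1)).nodup_iff).mpr (hitemsfst ▸ hndks)
  -- the two rank dicts are equal: both have items pvRanks osE 1
  have hd : (mcFlat.foldl
      (fun (st : PySem.Dict Int Int × Int) p => (st.1.insert p.1 st.2, st.2 + 1))
      (PySem.Dict.empty, 1)).1
    = PySem.Dict.ofList (osE.zip (PySem.List.pyRange 1 ((osE.length : Int) + 1))) := by
    apply PySem.Dict.ext
    rw [pv_rank_fold mcFlat PySem.Dict.empty 1
      (by intro p _; exact PySem.Dict.contains_empty _)
      (hos ▸ hndos)]
    have hzip : osE.zip (PySem.List.pyRange 1 ((osE.length : Int) + 1)) = pvRanks osE 1 := by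
      have hb : ((osE.length : Int) + 1) = 1 + (osE.length : Int) := by omega
      rw [hb]
      exact pv_zip_range osE 1
    have hBitems : (PySem.Dict.ofList (pvRanks osE 1)).items = pvRanks osE 1 := by
      have hfr : ∀ p ∈ pvRanks osE 1, (PySem.Dict.empty : PySem.Dict Int Int).contains p.1 = false := by
        intro p _; exact PySem.Dict.contains_empty _
      have hnd : ((pvRanks osE 1).map (fun p => p.1)).Nodup := by
        rw [pvRanks_map_fst]; exact hndos
      have := PySem.Dict.items_foldl_insert_fresh (pvRanks osE 1)
        (fun p : Int × Int => p.1) (fun p : Int × Int => p.2) PySem.Dict.empty hfr hnd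
      simpa [PySem.Dict.ofList, PySem.Dict.update] using this
    rw [hzip, hBitems, hos]
    rfl
  rw [hd]
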